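-- pv_equiv track=rewrite | github.com/fran-penedo/templogic | templogic/tssl/quadtree.py | _label_to_index
-- ===== SOURCE A (Python) =====
-- def _nnodes(depth):
--     if depth < 0:
--         return 0
--     return (4 ** (depth + 1) - 1) // 3
--
-- def _label_to_index(label, depth):
--     # if "".join(map(str, label)) == '00001':
--     #     import pdb; pdb.set_trace()
--     idx = label[0] * _nnodes(depth)
--     level = len(label) - 1
--     if level == 0:
--         return idx
--     idx += _nnodes(level - 1)
--     for i in label[1:-1]:
--         level -= 1
--         idx += i * (4 ** level)
--
--     return idx + label[-1]
-- ===== SOURCE B (Python) =====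
-- def _nnodes(depth):
--     if depth < 0:
--         return 0
--     return (4 ** (depth + 1) - 1) // 3
--
-- def _label_to_index(label, depth):
--     # Tree-descent (heap-style child index): walking from the root, the d-th
--     # child of the node with within-tree index k has index 4*k + d + 1.
--     # No level counter, no 4**level powers, no _nnodes level offset, no
--     # special case for length-1 labels.
--     k = 0
--     for d in label[1:]:
--         k = 4 * k + d + 1
--     return k + label[0] * _nnodes(depth)
-- ===== Notes on version B (the rewrite author's own statement) =====
-- stated objective: faster
-- what changed: Replaces A's positional-number-system computation (level counter, per-digit 4**level powers, _nnodes(level-1) offset and a level==0 special case) with the heap-style tree-descent recurrence: from the root, stepping to child d maps within-tree index k to 4*k+d+1, so one uniform fold over label[1:] yields the index.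
import Mathlib
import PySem

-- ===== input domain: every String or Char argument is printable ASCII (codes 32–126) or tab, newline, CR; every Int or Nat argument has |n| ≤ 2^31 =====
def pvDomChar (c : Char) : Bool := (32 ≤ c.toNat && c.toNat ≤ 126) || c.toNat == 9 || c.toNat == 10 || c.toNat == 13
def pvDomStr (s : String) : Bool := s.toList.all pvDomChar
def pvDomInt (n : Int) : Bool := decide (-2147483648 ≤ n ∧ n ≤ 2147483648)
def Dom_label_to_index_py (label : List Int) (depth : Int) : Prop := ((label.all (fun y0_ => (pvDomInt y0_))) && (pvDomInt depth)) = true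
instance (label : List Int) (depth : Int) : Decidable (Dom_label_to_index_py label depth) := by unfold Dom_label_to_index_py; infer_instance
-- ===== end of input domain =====

-- B replaces A's positional computation (level counter, 4**level powers, _nnodes(level-1)
-- offset, level==0 special case) by the heap-style tree-descent recurrence k -> 4*k + d + 1.

-- ===== PORT A =====
-- helper _nnodes; '//' is Python floor division (PySem.Int.floordiv); exponent (depth+1) is ≥ 0 here so .toNat is exact
def pvNnodes (depth : Int) : Int :=
  if depth < 0 then 0 else PySem.Int.floordiv (4 ^ (depth + 1).toNat - 1) 3

def label_to_index_py (label : List Int) (depth : Int) : Int :=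
  -- 'label[0]' / 'label[-1]': Pre_ requires label ≠ [], so pyGetD is exact; '4 ** level' with
  -- level ≥ 1 inside the loop, so the Nat exponent (st.1 - 1).toNat is exact
  let idx := PySem.List.pyGetD label 0 0 * pvNnodes depth
  let level : Int := (label.length : Int) - 1
  if level = 0 then idx
  else
    let st := (PySem.List.slice label (some 1) (some (-1))).foldl
        (fun (st : Int × Int) i => (st.1 - 1, st.2 + i * 4 ^ (st.1 - 1).toNat))
        (level, idx + pvNnodes (level - 1))
    st.2 + PySem.List.pyGetD label (-1) 0

-- ===== PORT B =====
def label_to_index_py_alt (label : List Int) (depth : Int) : Int :=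
  let k := (PySem.List.slice label (some 1) none).foldl (fun k d => 4 * k + d + 1) 0
  k + PySem.List.pyGetD label 0 0 * pvNnodes depth

-- ===== PRECONDITION & SPEC =====
-- Python A raises IndexError at label[0] when label is empty; that is the only exclusion.
def Pre_label_to_index_py (label : List Int) (_depth : Int) : Prop := label ≠ []
instance (label : List Int) (depth : Int) : Decidable (Pre_label_to_index_py label depth) := by unfold Pre_label_to_index_py; infer_instance
def pvWitness_label_to_index_py : List Int × Int := ([1, 2, 3], 4)

def Spec_label_to_index_py (label : List Int) (depth : Int) (out : Int) : Prop := out = label_to_index_py_alt label depth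
instance (label : List Int) (depth : Int) (out : Int) : Decidable (Spec_label_to_index_py label depth out) := by unfold Spec_label_to_index_py; infer_instance

-- ===== CLAIM (what is proved, stated in full; the proofs are below) =====
def Claim_equal_label_to_index_py : Prop := ∀ (label : List Int) (depth : Int), Dom_label_to_index_py label depth → Pre_label_to_index_py label depth → Spec_label_to_index_py label depth (label_to_index_py label depth)

-- ===== LEMMAS AND PROOFS =====

-- _nnodes satisfies the tree-descent recurrence: nnodes(n) = 4*nnodes(n-1) + 1 for n ≥ 0
theorem pv_nnodes_rec (n : ℕ) : pvNnodes (n : Int) = 4 * pvNnodes ((n : Int) - 1) + 1 := by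
  cases n with
  | zero => decide
  | succ m =>
    have h3 : ∀ k : ℕ, (3 : Int) ∣ 4 ^ (k + 1) - 1 := by
      intro k
      induction k with
      | zero => decide
      | succ m ih =>
        obtain ⟨c, hc⟩ := ih
        exact ⟨4 * c + 1, by rw [pow_succ]; omega⟩
    have hfd : ∀ k : ℕ, pvNnodes (k : Int) = (4 ^ (k + 1) - 1) / 3 := by
      intro k
      have hk : ¬ ((k : Int) < 0) := by omega
      simp only [pvNnodes, if_neg hk]
      rw [PySem.Int.floordiv_eq_ediv_of_pos (by norm_num)]
      have ht : ((k : Int) + 1).toNat = k + 1 := by omega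
      rw [ht]
    have hm1 : ((m : Int) + 1) - 1 = (m : Int) := by ring
    have e1 := hfd (m + 1)
    have e2 := hfd m
    push_cast at e1 e2 ⊢
    rw [hm1, e1, e2]
    have d1 := h3 (m + 1)
    have d2 := h3 m
    obtain ⟨a, ha⟩ := d1
    obtain ⟨b, hb⟩ := d2
    rw [ha, hb, Int.mul_ediv_cancel_left _ (by norm_num), Int.mul_ediv_cancel_left _ (by norm_num)]
    have hpow : (4 : Int) ^ (m + 1 + 1) = 4 * 4 ^ (m + 1) := by ring
    omega

-- B's fold over r (= label[1:]) equals A's level offset plus the positional (Horner) sum of r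
theorem pv_foldB (r : List Int) :
    r.foldl (fun k d => 4 * k + d + 1) 0
      = pvNnodes ((r.length : Int) - 1) + r.foldl (fun s i => s * 4 + i) 0 := by
  induction r using List.reverseRecOn with
  | nil => simp [pvNnodes]
  | append_singleton t x ih =>
    rw [List.foldl_append, List.foldl_append, ih]
    simp only [List.foldl_cons, List.foldl_nil, List.length_append, List.length_cons,
      List.length_nil]
    have : ((t.length + 1 : ℕ) : Int) - 1 = (t.length : Int) := by push_cast; ring
    rw [this, pv_nnodes_rec]
    ring

-- Horner fold with starting accumulator c
theorem pv_horner_shift (r : List Int) (c : Int) :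
    r.foldl (fun s i => s * 4 + i) c = c * 4 ^ r.length + r.foldl (fun s i => s * 4 + i) 0 := by
  induction r generalizing c with
  | nil => simp
  | cons a t ih =>
    simp only [List.foldl_cons, List.length_cons]
    rw [ih (c * 4 + a), ih (0 * 4 + a)]
    ring

-- A's loop over r (= label[1:-1]) starting at level r.length+1, plus the last element x,
-- equals the Horner sum of r ++ [x] added to the starting accumulator c.
theorem pv_loopA (r : List Int) (x c : Int) :
    (r.foldl (fun (st : Int × Int) i => (st.1 - 1, st.2 + i * 4 ^ (st.1 - 1).toNat))
        (((r.length : Int) + 1), c)).2 + x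
      = c + (r ++ [x]).foldl (fun s i => s * 4 + i) 0 := by
  induction r generalizing c with
  | nil => simp
  | cons a t ih =>
    simp only [List.foldl_cons, List.length_cons]
    push_cast
    have h1 : ((t.length : Int) + 1 + 1) - 1 = (t.length : Int) + 1 := by ring
    rw [h1]
    have h2 : ((t.length : Int) + 1).toNat = t.length + 1 := by omega
    rw [h2, ih]
    simp only [List.cons_append, List.foldl_cons]
    rw [pv_horner_shift (t ++ [x]) (0 * 4 + a)]
    simp only [List.length_append, List.length_cons, List.length_nil]
    ring

theorem pv_slice_mid (a : Int) (r : List Int) :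
    PySem.List.slice (a :: r) (some 1) (some (-1)) = r.dropLast := by
  simp [PySem.List.slice, List.dropLast_eq_take]

-- ===== VERDICT (by name: the statement is the Claim_ definition above) =====
theorem label_to_index_py_spec : Claim_equal_label_to_index_py := by
  intro label depth _ hpre
  unfold Spec_label_to_index_py label_to_index_py label_to_index_py_alt
  match label with
  | [] => exact absurd rfl hpre
  | a :: r =>
    rw [PySem.List.slice_from_one, List.tail_cons, pv_foldB]
    rcases r.eq_nil_or_concat with hr | ⟨t, x, hx⟩
    · subst hr
      simp [pvNnodes]
    · rw [List.concat_eq_append] at hx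
      subst hx
      have hlen : ((a :: (t ++ [x])).length : Int) - 1 ≠ 0 := by
        simp [List.length_append]; omega
      rw [if_neg hlen, pv_slice_mid]
      have hdl : (t ++ [x]).dropLast = t := by simp
      have hget : PySem.List.pyGetD (a :: (t ++ [x])) (-1) 0 = x := by
        have := PySem.List.pyGetD_neg_one_append_singleton (a :: t) x (0 : Int)
        simpa using this
      have hlev : ((a :: (t ++ [x])).length : Int) - 1 = (t.length : Int) + 1 := by
        simp [List.length_append]
      rw [hdl, hget, hlev, pv_loopA]
      have h11 : (t.length : Int) + 1 - 1 = (t.length : Int) := by ring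
      have hln : ((t ++ [x]).length : Int) - 1 = (t.length : Int) := by
        simp
      rw [h11, hln]
      ring
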